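-- pv_equiv track=rewrite | github.com/ma-lacroix/adventofcode | 2025/aoc2025_05.py | create_linear_sequence
-- ===== SOURCE A (Python) =====
-- def create_linear_sequence(fresh_ranges: list[str]) -> list[str]:
--     for i in range(1, len(fresh_ranges)):
--         one = [int(e) for e in fresh_ranges[i-1].split('-')]
--         two = [int(e) for e in fresh_ranges[i].split('-')]
--         if two[1] < one[1]:
--             two[1] = one[1]
--         if two[0] < one[1]:
--             new_end = two[0] - 1
--             if new_end < one[0]:
--                 new_end = one[0]
--             one[1] = new_end
--         fresh_ranges[i-1] = f"{one[0]}-{one[1]}"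
--         fresh_ranges[i] = f"{two[0]}-{two[1]}"
--     return fresh_ranges
-- ===== SOURCE B (Python) =====
-- def create_linear_sequence(fresh_ranges: list[str]) -> list[str]:
--     # Staged rewrite: remember the original low endpoints, then two sweeps over
--     # the list — pass 1 raises each high endpoint, pass 2 shrinks each previous
--     # high endpoint — writing one slot per step (in place, like the original).
--     n = len(fresh_ranges)
--     if n <= 1:
--         return fresh_ranges
--     lows = [[int(e) for e in s.split('-')][0] for s in fresh_ranges]
--     # pass 1: extend each high endpoint to cover its predecessor's
--     for i in range(1, n):
--         prev_hi = [int(e) for e in fresh_ranges[i - 1].split('-')][1]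
--         cur = [int(e) for e in fresh_ranges[i].split('-')]
--         lo, hi = cur[0], cur[1]
--         if hi < prev_hi:
--             hi = prev_hi
--         fresh_ranges[i] = f"{lo}-{hi}"
--     # pass 2: pull each high endpoint below the next range's original start
--     for i in range(1, n):
--         prev = [int(e) for e in fresh_ranges[i - 1].split('-')]
--         lo1, hi1 = prev[0], prev[1]
--         lo2 = lows[i]
--         if lo2 < hi1:
--             hi1 = max(lo2 - 1, lo1)
--         fresh_ranges[i - 1] = f"{lo1}-{hi1}"
--     return fresh_ranges
-- ===== Notes on version B (the rewrite author's own statement) =====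
-- stated objective: alternative
-- what changed: A is one interleaved sweep that rewrites two adjacent slots per step with both clamp branches; B first records the original low endpoints, then runs two independent single-write sweeps: pass 1 only raises each high endpoint over its predecessor's, pass 2 only shrinks each previous high endpoint below the next range's original start.
import Mathlib
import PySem

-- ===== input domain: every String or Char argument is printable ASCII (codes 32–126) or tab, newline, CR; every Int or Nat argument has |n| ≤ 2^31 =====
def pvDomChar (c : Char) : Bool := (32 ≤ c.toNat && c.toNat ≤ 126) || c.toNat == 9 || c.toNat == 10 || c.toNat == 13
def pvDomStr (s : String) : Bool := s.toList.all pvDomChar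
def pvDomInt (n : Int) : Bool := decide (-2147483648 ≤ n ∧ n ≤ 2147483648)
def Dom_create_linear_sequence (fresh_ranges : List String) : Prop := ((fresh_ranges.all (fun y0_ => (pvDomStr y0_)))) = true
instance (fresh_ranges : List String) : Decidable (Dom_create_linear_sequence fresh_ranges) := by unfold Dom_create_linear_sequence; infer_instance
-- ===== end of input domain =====

-- B replaces A's single interleaved sweep (two slot writes per step, both clamp branches in one
-- body) by three stages: record the original low endpoints, then a sweep that only raises each
-- high endpoint over its predecessor's, then a sweep that only shrinks each previous high
-- endpoint below the next range's original start; objective: alternative (same cost).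
-- Both A and B mutate the argument list in place in Python; the equivalence proved here is about
-- the RETURN value (B performs the same in-place update).

-- ===== PORT A =====
-- [int(e) for e in s.split('-')]; `.getD []` stands for the ValueError case, excluded by Pre_
def pvParseA (s : String) : List Int :=
  (((PySem.Str.split? s "-").getD []).mapM PySem.Int.ofStr?).getD []

-- one iteration of A's `for i in range(1, len(fresh_ranges))`.
-- `one[1] = new_end` / `two[1] = one[1]` are rendered on the scalars one[0], one[1], two[0], two[1]
-- extracted once (pyGetD, default never reached under Pre_): exact wherever the parsed piece lists
-- have length ≥ 2, which Pre_ guarantees for every string A parses.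
def pvStepA (xs : List String) (i : Int) : List String :=
  let one := pvParseA (PySem.List.pyGetD xs (i - 1) "")
  let two := pvParseA (PySem.List.pyGetD xs i "")
  let one0 := PySem.List.pyGetD one 0 0
  let one1 := PySem.List.pyGetD one 1 0
  let two0 := PySem.List.pyGetD two 0 0
  let two1 := PySem.List.pyGetD two 1 0
  let two1 := if two1 < one1 then one1 else two1
  let one1 :=
    if two0 < one1 then
      let new_end := two0 - 1
      let new_end := if new_end < one0 then one0 else new_end
      new_end
    else one1
  let xs := PySem.List.pySetD xs (i - 1) (PySem.Int.toStr one0 ++ "-" ++ PySem.Int.toStr one1)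
  PySem.List.pySetD xs i (PySem.Int.toStr two0 ++ "-" ++ PySem.Int.toStr two1)

def create_linear_sequence (fresh_ranges : List String) : List String :=
  (PySem.List.pyRange 1 (PySem.List.len fresh_ranges) 1).foldl pvStepA fresh_ranges

-- ===== PORT B =====
-- [int(e) for e in s.split('-')] in Source B (same comprehension as A; `.getD []` = ValueError, outside Pre_)
def pvParseB (s : String) : List Int :=
  (((PySem.Str.split? s "-").getD []).mapM PySem.Int.ofStr?).getD []

-- body of Source B's pass 1: only raise this range's high endpoint over its predecessor's
def pvStep1 (xs : List String) (i : Int) : List String :=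
  let prev_hi := PySem.List.pyGetD (pvParseB (PySem.List.pyGetD xs (i - 1) "")) 1 0
  let cur := pvParseB (PySem.List.pyGetD xs i "")
  let lo := PySem.List.pyGetD cur 0 0
  let hi := PySem.List.pyGetD cur 1 0
  let hi := if hi < prev_hi then prev_hi else hi
  PySem.List.pySetD xs i (PySem.Int.toStr lo ++ "-" ++ PySem.Int.toStr hi)

-- body of Source B's pass 2: only shrink the previous high endpoint below lows[i]
def pvStep2 (lows : List Int) (xs : List String) (i : Int) : List String :=
  let prev := pvParseB (PySem.List.pyGetD xs (i - 1) "")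
  let lo1 := PySem.List.pyGetD prev 0 0
  let hi1 := PySem.List.pyGetD prev 1 0
  let lo2 := PySem.List.pyGetD lows i 0
  let hi1 := if lo2 < hi1 then max (lo2 - 1) lo1 else hi1
  PySem.List.pySetD xs (i - 1) (PySem.Int.toStr lo1 ++ "-" ++ PySem.Int.toStr hi1)

def create_linear_sequence_alt (fresh_ranges : List String) : List String :=
  let n := PySem.List.len fresh_ranges
  if n ≤ 1 then fresh_ranges
  else
    let lows := fresh_ranges.map (fun s => PySem.List.pyGetD (pvParseB s) 0 0)
    let r1 := (PySem.List.pyRange 1 n 1).foldl pvStep1 fresh_ranges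
    (PySem.List.pyRange 1 n 1).foldl (pvStep2 lows) r1

-- ===== PRECONDITION & SPEC =====
-- Pre_ = exactly the inputs on which Python A returns: with ≥ 2 elements, every element must
-- split on '-' into at least two pieces (else two[1] is an IndexError) all of which int() accepts
-- (else ValueError); with ≤ 1 element A touches nothing. (Mid-loop re-parses never fail: pieces
-- contain no '-', so all parsed values are ≥ 0 and stay so.)
def Pre_create_linear_sequence (fresh_ranges : List String) : Prop :=
  fresh_ranges.length ≤ 1 ∨
    ∀ s ∈ fresh_ranges,
      2 ≤ ((PySem.Str.split? s "-").getD []).length ∧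
      ∀ p ∈ (PySem.Str.split? s "-").getD [], (PySem.Int.ofStr? p).isSome = true
instance (fresh_ranges : List String) : Decidable (Pre_create_linear_sequence fresh_ranges) := by
  unfold Pre_create_linear_sequence; infer_instance

def pvWitness_create_linear_sequence : List String := ["3-5", "4-9", "6-12"]

def Spec_create_linear_sequence (fresh_ranges : List String) (out : List String) : Prop := out = create_linear_sequence_alt fresh_ranges
instance (fresh_ranges : List String) (out : List String) : Decidable (Spec_create_linear_sequence fresh_ranges out) := by unfold Spec_create_linear_sequence; infer_instance

-- ===== CLAIM (what is proved, stated in full; the proofs are below) =====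
def Claim_equal_create_linear_sequence : Prop := ∀ (fresh_ranges : List String), Dom_create_linear_sequence fresh_ranges → Pre_create_linear_sequence fresh_ranges → Spec_create_linear_sequence fresh_ranges (create_linear_sequence fresh_ranges)

-- ===== LEMMAS AND PROOFS =====

-- the two per-pair string transforms both programs are built from
def pvFmt (a b : Int) : String := PySem.Int.toStr a ++ "-" ++ PySem.Int.toStr b
def pvLo (s : String) : Int := PySem.List.pyGetD (pvParseA s) 0 0
def pvHi (s : String) : Int := PySem.List.pyGetD (pvParseA s) 1 0
def pvS1 (prev cur : String) : String :=
  pvFmt (pvLo cur) (if pvHi cur < pvHi prev then pvHi prev else pvHi cur)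
def pvS2 (prev : String) (lo2 : Int) : String :=
  pvFmt (pvLo prev) (if lo2 < pvHi prev then max (lo2 - 1) (pvLo prev) else pvHi prev)

-- the pass-1 scan (u-sequence) and the final strings, as structural recursions
def pvUs (prev : String) : List String → List String
  | [] => [prev]
  | c :: t => prev :: pvUs (pvS1 prev c) t
def pvFinals (prev : String) : List String → List String
  | [] => [prev]
  | c :: t => pvS2 prev (pvLo c) :: pvFinals (pvS1 prev c) t
def pvZip (prev : String) : List Int → List String → List String
  | l :: ls, c :: t => pvS2 prev l :: pvZip c ls t
  | _, _ => [prev]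

theorem pv_if_max (a b : Int) : (if a ≤ b then b else a - 1) = max (a - 1) b := by
  rw [max_def]; split_ifs <;> omega

-- A's step at index pre.length + 1 on pre ++ prev :: cur :: t rewrites exactly the two middle slots
theorem pvStepA_eq (pre t : List String) (prev cur : String) :
    pvStepA (pre ++ prev :: cur :: t) ((pre.length : Int) + 1)
      = pre ++ pvS2 prev (pvLo cur) :: pvS1 prev cur :: t := by
  unfold pvStepA pvS2 pvS1 pvFmt pvLo pvHi pvParseA
  have e1 : (pre.length : Int) + 1 - 1 = ((pre.length : Nat) : Int) := by omega
  have e2 : (pre.length : Int) + 1 = ((pre.length + 1 : Nat) : Int) := by push_cast; omega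
  rw [e1, e2]
  rw [PySem.List.pyGetD_natCast, PySem.List.pyGetD_natCast,
      PySem.List.pySetD_natCast, PySem.List.pySetD_natCast]
  have hA : (pre ++ prev :: cur :: t).getD pre.length "" = prev := by
    simp [List.getD]
  have hB : (pre ++ prev :: cur :: t).getD (pre.length + 1) "" = cur := by
    simp [List.getD]
  rw [hA, hB]
  simp [pv_if_max]

-- A's fold from index pre.length + 1 computes the final strings of the untouched tail
theorem pvA_main (t : List String) : ∀ (pre : List String) (prev : String),
    (PySem.List.pyRange ((pre.length : Int) + 1) ((pre.length : Int) + 1 + t.length) 1).foldl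
        pvStepA (pre ++ prev :: t)
      = pre ++ pvFinals prev t := by
  induction t with
  | nil =>
      intro pre prev
      rw [PySem.List.pyRange_one_eq_nil (by simp)]
      simp [pvFinals]
  | cons cur t ih =>
      intro pre prev
      rw [PySem.List.pyRange_one_cons (by simp)]
      simp only [List.foldl_cons, pvStepA_eq]
      have h1 : pre ++ pvS2 prev (pvLo cur) :: pvS1 prev cur :: t
          = (pre ++ [pvS2 prev (pvLo cur)]) ++ pvS1 prev cur :: t := by simp
      have h2 : ((pre.length : Int) + 1) + 1 = ((pre ++ [pvS2 prev (pvLo cur)]).length : Int) + 1 := by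
        simp
      have h3 : ((pre.length : Int) + 1) + ((cur :: t).length : Int)
          = ((pre ++ [pvS2 prev (pvLo cur)]).length : Int) + 1 + (t.length : Int) := by
        simp; omega
      rw [h1, h2, h3, ih]
      simp [pvFinals]

-- B's pass-1 step at index pre.length + 1 rewrites exactly the slot holding cur
theorem pvStep1_eq (pre t : List String) (prev cur : String) :
    pvStep1 (pre ++ prev :: cur :: t) ((pre.length : Int) + 1)
      = pre ++ prev :: pvS1 prev cur :: t := by
  unfold pvStep1 pvS1 pvFmt pvLo pvHi pvParseB pvParseA
  have e1 : (pre.length : Int) + 1 - 1 = ((pre.length : Nat) : Int) := by omega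
  have e2 : (pre.length : Int) + 1 = ((pre.length + 1 : Nat) : Int) := by push_cast; omega
  rw [e1, e2]
  rw [PySem.List.pyGetD_natCast, PySem.List.pyGetD_natCast, PySem.List.pySetD_natCast]
  have hA : (pre ++ prev :: cur :: t).getD pre.length "" = prev := by
    simp [List.getD]
  have hB : (pre ++ prev :: cur :: t).getD (pre.length + 1) "" = cur := by
    simp [List.getD]
  rw [hA, hB]
  simp

-- B's pass 1 computes the u-sequence of the untouched tail
theorem pvB1_main (t : List String) : ∀ (pre : List String) (prev : String),
    (PySem.List.pyRange ((pre.length : Int) + 1) ((pre.length : Int) + 1 + t.length) 1).foldl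
        pvStep1 (pre ++ prev :: t)
      = pre ++ pvUs prev t := by
  induction t with
  | nil =>
      intro pre prev
      rw [PySem.List.pyRange_one_eq_nil (by simp)]
      simp [pvUs]
  | cons cur t ih =>
      intro pre prev
      rw [PySem.List.pyRange_one_cons (by simp)]
      simp only [List.foldl_cons, pvStep1_eq]
      have h1 : pre ++ prev :: pvS1 prev cur :: t
          = (pre ++ [prev]) ++ pvS1 prev cur :: t := by simp
      have h2 : ((pre.length : Int) + 1) + 1 = ((pre ++ [prev]).length : Int) + 1 := by simp
      have h3 : ((pre.length : Int) + 1) + ((cur :: t).length : Int)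
          = ((pre ++ [prev]).length : Int) + 1 + (t.length : Int) := by simp; omega
      rw [h1, h2, h3, ih]
      simp [pvUs]

-- B's pass-2 step at index pre.length + 1 rewrites exactly the slot holding prev
theorem pvStep2_eq (lpre : List Int) (l : Int) (ls : List Int)
    (pre rest : List String) (prev : String) (hl : lpre.length = pre.length + 1) :
    pvStep2 (lpre ++ l :: ls) (pre ++ prev :: rest) ((pre.length : Int) + 1)
      = pre ++ pvS2 prev l :: rest := by
  unfold pvStep2 pvS2 pvFmt pvLo pvHi pvParseB pvParseA
  have e1 : (pre.length : Int) + 1 - 1 = ((pre.length : Nat) : Int) := by omega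
  have e2 : (pre.length : Int) + 1 = ((pre.length + 1 : Nat) : Int) := by push_cast; omega
  rw [e1, e2]
  rw [PySem.List.pyGetD_natCast, PySem.List.pyGetD_natCast, PySem.List.pySetD_natCast]
  have hA : (pre ++ prev :: rest).getD pre.length "" = prev := by
    simp [List.getD]
  have hB : (lpre ++ l :: ls).getD (pre.length + 1) 0 = l := by
    simp [List.getD, ← hl]
  rw [hA, hB]
  simp

theorem pvZip_nil (ls : List Int) (prev : String) : pvZip prev ls [] = [prev] := by
  cases ls <;> rfl

-- B's pass 2 zips the saved lows with the pass-1 strings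
theorem pvB2_main (t : List String) : ∀ (lpre : List Int) (ls : List Int)
    (pre : List String) (prev : String),
    lpre.length = pre.length + 1 → ls.length = t.length →
    (PySem.List.pyRange ((pre.length : Int) + 1) ((pre.length : Int) + 1 + t.length) 1).foldl
        (pvStep2 (lpre ++ ls)) (pre ++ prev :: t)
      = pre ++ pvZip prev ls t := by
  induction t with
  | nil =>
      intro lpre ls pre prev hl hls
      rw [PySem.List.pyRange_one_eq_nil (by simp)]
      simp [pvZip_nil]
  | cons cur t ih =>
      intro lpre ls pre prev hl hls
      cases ls with
      | nil => simp at hls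
      | cons l ls =>
          rw [PySem.List.pyRange_one_cons (by simp)]
          simp only [List.foldl_cons]
          rw [pvStep2_eq lpre l ls pre (cur :: t) prev hl]
          have h1 : pre ++ pvS2 prev l :: cur :: t
              = (pre ++ [pvS2 prev l]) ++ cur :: t := by simp
          have h2 : ((pre.length : Int) + 1) + 1 = ((pre ++ [pvS2 prev l]).length : Int) + 1 := by
            simp
          have h3 : ((pre.length : Int) + 1) + ((cur :: t).length : Int)
              = ((pre ++ [pvS2 prev l]).length : Int) + 1 + (t.length : Int) := by simp; omega
          have h4 : lpre ++ l :: ls = (lpre ++ [l]) ++ ls := by simp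
          rw [h1, h2, h3, h4, ih (lpre ++ [l]) ls (pre ++ [pvS2 prev l]) cur (by simp [hl]) (by simpa using hls)]
          simp [pvZip]

theorem pvUs_length (t : List String) : ∀ (p : String), (pvUs p t).length = t.length + 1 := by
  induction t with
  | nil => intro p; rfl
  | cons a u ihu => intro p; simp [pvUs, ihu]

-- pass 2 over the u-sequence with the original lows produces exactly the final strings
theorem pvZip_finals (t : List String) : ∀ (prev : String),
    pvZip prev (t.map pvLo) (pvUs prev t).tail = pvFinals prev t := by
  induction t with
  | nil => intro prev; rfl
  | cons c t ih =>
      intro prev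
      have hu : pvUs (pvS1 prev c) t = pvS1 prev c :: (pvUs (pvS1 prev c) t).tail := by
        cases t <;> rfl
      simp only [pvUs, List.map_cons, List.tail_cons]
      rw [hu]
      simp only [pvZip, pvFinals]
      rw [ih]

-- ===== VERDICT (by name: the statement is the Claim_ definition above) =====
theorem create_linear_sequence_spec : Claim_equal_create_linear_sequence := by
  intro fr _ _
  unfold Spec_create_linear_sequence create_linear_sequence create_linear_sequence_alt
  cases fr with
  | nil => simp [PySem.List.pyRange_one_eq_nil, PySem.List.len]
  | cons h t =>
      cases t with
      | nil => simp [PySem.List.pyRange_one_eq_nil, PySem.List.len]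
      | cons c t =>
          have hn : ¬ PySem.List.len (h :: c :: t) ≤ 1 := by
            simp [PySem.List.len]
          simp only [hn, if_false]
          have e0 : ((List.length ([] : List String) : Int) + 1) = 1 := by simp
          have eb : ((List.length ([] : List String) : Int) + 1) + ((c :: t).length : Int)
              = PySem.List.len (h :: c :: t) := by simp [PySem.List.len]; omega
          have eb2 : ((List.length ([] : List String) : Int) + 1)
                + ((pvUs (pvS1 h c) t).length : Int)
              = PySem.List.len (h :: c :: t) := by
            simp [PySem.List.len, pvUs_length]; omega
          have hA := pvA_main (c :: t) [] h
          rw [eb, e0] at hA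
          simp only [List.nil_append] at hA
          have hB1 := pvB1_main (c :: t) [] h
          rw [eb, e0] at hB1
          simp only [List.nil_append] at hB1
          have hB2 := pvB2_main (pvUs (pvS1 h c) t) [pvLo h] ((c :: t).map pvLo)
            [] h (by simp) (by simp [pvUs_length])
          rw [eb2, e0] at hB2
          have hlows : (h :: c :: t).map (fun s => PySem.List.pyGetD (pvParseB s) 0 0)
              = [pvLo h] ++ (c :: t).map pvLo := by
            simp [pvLo, pvParseA, pvParseB]
          have hus : pvUs h (c :: t) = [] ++ h :: pvUs (pvS1 h c) t := rfl
          have hz : pvZip h ((c :: t).map pvLo) (pvUs (pvS1 h c) t) = pvFinals h (c :: t) := by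
            simpa [pvUs] using pvZip_finals (c :: t) h
          rw [hA, hB1, hlows, hus, hB2]
          simp only [List.nil_append]
          exact hz.symm
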